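-- pv_equiv track=rewrite | github.com/Guadalupee01/8puzzle | Unidad-1/frontend.py | _used_numbers
-- ===== SOURCE A (Python) =====
-- def _used_numbers(matrix, exclude=None):
--     used = set() # aqui se guardan los numeros ya usados
--     ex_val = None # valor de la celda excluida (si hay)
--     if exclude is not None: # si no es none, entonces el usuario selecciono una casilla para editar
--         r, c = exclude # fila y columna de la celda seleccionada
--         ex_val = matrix[r][c] # guarda el numero que estaba en esa celda
--
--     #recorre toda la matriz
--     # si i,j es la celda excluida se salta, si no añade el numero de esa celda al conjunto de usados
--     for i in range(3):
--         for j in range(3):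
--             if exclude and (i,j) == exclude:
--                 continue
--             used.add(matrix[i][j])
--
--             # mmm en el caso de que pase que el valor de la celda excluida ya estuviera en uso, lo eliminamos
--     if ex_val in used:
--         used.remove(ex_val)
--     return used
-- ===== SOURCE B (Python) =====
-- def _used_numbers(matrix, exclude=None):
--     ex_val = None
--     if exclude is not None:
--         r, c = exclude  # same unpack/index as A, so bad exclude raises identically
--         ex_val = matrix[r][c]
--
--     # recursive decomposition: the used set of rows i..2 is the set of the first
--     # three values of row i unioned with the used set of the remaining rows
--     def from_row(i):
--         if i == 3:
--             return set()
--         return set(matrix[i][:3]) | from_row(i + 1)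
--
--     used = from_row(0)
--     used.discard(ex_val)
--     return used
-- ===== Notes on version B (the rewrite author's own statement) =====
-- stated objective: alternative
-- what changed: B replaces A's nested index loops with per-cell skip branch and guarded membership-test-then-remove by a recursive decomposition: it unions per-row sets built from row slices (set(matrix[i][:3]) for i = 0,1,2, recursively) and then unconditionally discards the excluded cell's value.
import Mathlib
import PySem

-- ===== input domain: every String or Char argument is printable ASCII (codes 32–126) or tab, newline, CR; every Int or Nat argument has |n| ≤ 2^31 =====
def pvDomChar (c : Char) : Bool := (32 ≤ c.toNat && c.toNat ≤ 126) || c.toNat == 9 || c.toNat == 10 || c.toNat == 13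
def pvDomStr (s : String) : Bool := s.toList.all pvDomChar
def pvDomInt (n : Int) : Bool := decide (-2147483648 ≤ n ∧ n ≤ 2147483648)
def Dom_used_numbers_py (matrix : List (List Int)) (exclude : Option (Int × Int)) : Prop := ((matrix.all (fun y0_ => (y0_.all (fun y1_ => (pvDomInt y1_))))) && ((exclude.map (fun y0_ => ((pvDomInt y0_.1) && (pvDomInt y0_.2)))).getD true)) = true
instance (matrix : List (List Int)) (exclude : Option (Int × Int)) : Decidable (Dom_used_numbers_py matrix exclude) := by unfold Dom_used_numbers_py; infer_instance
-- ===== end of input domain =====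

-- B replaces A's nested index loops (skip branch + guarded remove) by a recursive
-- union of per-row slice sets followed by an unconditional discard (objective: alternative).

-- ===== PORT A =====
def used_numbers_py (matrix : List (List Int)) (exclude : Option (Int × Int)) : List Int :=
  let exVal : Option Int :=
    match exclude with
    | none => none
    | some (r, c) => some (PySem.List.pyGetD (PySem.List.pyGetD matrix r []) c 0)
  let used : PySem.Set Int :=
    (PySem.List.pyRange 0 3 1).foldl (fun used i =>
      (PySem.List.pyRange 0 3 1).foldl (fun used j =>
        if exclude = some (i, j) then used
        else PySem.Set.add used (PySem.List.pyGetD (PySem.List.pyGetD matrix i []) j 0)) used)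
      PySem.Set.empty
  match exVal with
  | none => used
  | some v => if PySem.Set.contains used v then (PySem.Set.remove? used v).getD used else used

-- ===== PORT B =====
-- Python's recursive helper from_row(i); the guard is '3 ≤ i' (Python tests i == 3,
-- and only ever calls with i ≤ 3) so that Lean sees termination.
def fromRow (matrix : List (List Int)) (i : Nat) : PySem.Set Int :=
  if 3 ≤ i then PySem.Set.empty
  else PySem.Set.union
        (PySem.Set.ofList (PySem.List.slice (PySem.List.pyGetD matrix (i : Int) []) none (some 3)))
        (fromRow matrix (i + 1))
termination_by 3 - i

def used_numbers_py_alt (matrix : List (List Int)) (exclude : Option (Int × Int)) : List Int :=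
  let exVal : Option Int :=
    match exclude with
    | none => none
    | some (r, c) => some (PySem.List.pyGetD (PySem.List.pyGetD matrix r []) c 0)
  let used : PySem.Set Int := fromRow matrix 0
  -- used.discard(ex_val): discarding None from a set of ints is a no-op
  match exVal with
  | none => used
  | some v => PySem.Set.discard used v

-- ===== PRECONDITION & SPEC =====
-- Pre_ excludes exactly the inputs on which A raises IndexError: a grid with fewer
-- than 3 rows / short rows among the first three, or an exclude index out of range.
def Pre_used_numbers_py (matrix : List (List Int)) (exclude : Option (Int × Int)) : Prop :=
  3 ≤ matrix.length ∧ (∀ row ∈ matrix.take 3, 3 ≤ row.length) ∧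
  (exclude.all (fun rc =>
    ((PySem.List.pyGet? matrix rc.1).bind (fun row => PySem.List.pyGet? row rc.2)).isSome)) = true
instance (matrix : List (List Int)) (exclude : Option (Int × Int)) : Decidable (Pre_used_numbers_py matrix exclude) := by unfold Pre_used_numbers_py; infer_instance

def pvWitness_used_numbers_py : List (List Int) × (Option (Int × Int)) :=
  ([[1, 2, 3], [4, 5, 6], [7, 8, 0]], some (0, 0))

def Spec_used_numbers_py (matrix : List (List Int)) (exclude : Option (Int × Int)) (out : List Int) : Prop := out = used_numbers_py_alt matrix exclude
instance (matrix : List (List Int)) (exclude : Option (Int × Int)) (out : List Int) : Decidable (Spec_used_numbers_py matrix exclude out) := by unfold Spec_used_numbers_py; infer_instance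

-- ===== CLAIM (what is proved, stated in full; the proofs are below) =====
def Claim_equal_used_numbers_py : Prop := ∀ (matrix : List (List Int)) (exclude : Option (Int × Int)), Dom_used_numbers_py matrix exclude → Pre_used_numbers_py matrix exclude → Spec_used_numbers_py matrix exclude (used_numbers_py matrix exclude)

-- ===== LEMMAS AND PROOFS =====

-- Python's "if ex_val in used: used.remove(ex_val)" is exactly set.discard
theorem guarded_remove_eq_discard (s : List Int) (v : Int) :
    (if PySem.Set.contains s v then (PySem.Set.remove? s v).getD s else s)
      = PySem.Set.discard s v := by
  by_cases h : PySem.Set.contains s v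
  · have hv : v ∈ s := by simpa [PySem.Set.contains] using h
    simp [PySem.Set.contains, PySem.Set.remove?, hv]
  · have hv : v ∉ s := by simpa [PySem.Set.contains] using h
    simp only [h, PySem.Set.discard]
    exact (List.filter_eq_self.mpr (fun a ha => by
      simp only [Bool.not_eq_true', beq_eq_false_iff_ne, ne_eq]
      exact fun e => hv (e ▸ ha))).symm

theorem discard_add_self (s : List Int) (v : Int) :
    PySem.Set.discard (PySem.Set.add s v) v = PySem.Set.discard s v := by
  simp [PySem.Set.add, PySem.Set.discard]
  split <;> simp [List.filter_append]

theorem discard_add_congr (s t : List Int) (x v : Int)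
    (h : PySem.Set.discard s v = PySem.Set.discard t v) :
    PySem.Set.discard (PySem.Set.add s x) v = PySem.Set.discard (PySem.Set.add t x) v := by
  by_cases hx : x = v
  · subst hx; rw [discard_add_self, discard_add_self, h]
  · have hmem : x ∈ s ↔ x ∈ t := by
      constructor <;> intro hm
      · have : x ∈ PySem.Set.discard s v := by
          simp [PySem.Set.discard, List.mem_filter, hm, hx]
        rw [h] at this
        exact (List.mem_filter.mp this).1
      · have : x ∈ PySem.Set.discard t v := by
          simp [PySem.Set.discard, List.mem_filter, hm, hx]
        rw [← h] at this
        exact (List.mem_filter.mp this).1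
    by_cases hs : x ∈ s
    · simp [PySem.Set.add, PySem.Set.contains, hs, hmem.mp hs, h]
    · have ht : x ∉ t := fun hh => hs (hmem.mpr hh)
      have h' : List.filter (fun y => !y == v) s = List.filter (fun y => !y == v) t := by
        simpa [PySem.Set.discard] using h
      simp [PySem.Set.add, PySem.Set.contains, hs, ht,
        PySem.Set.discard, List.filter_append, hx, h']

-- skipping exactly the cells whose value is v does not change the set once v is discarded
theorem discard_fold_skip (L : List (Int × Int)) (f : Int × Int → Int) (e : Int × Int) (v : Int)
    (hfe : ∀ p ∈ L, p = e → f p = v) (s t : List Int)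
    (hst : PySem.Set.discard s v = PySem.Set.discard t v) :
    PySem.Set.discard
        (L.foldl (fun s p => if some e = some p then s else PySem.Set.add s (f p)) s) v
      = PySem.Set.discard (L.foldl (fun s p => PySem.Set.add s (f p)) t) v := by
  induction L generalizing s t with
  | nil => simpa using hst
  | cons p L ih =>
    simp only [List.foldl]
    by_cases hp : (some e : Option (Int × Int)) = some p
    · have hpv : f p = v := hfe p (by simp) (by simpa using hp.symm)
      rw [if_pos hp]
      exact ih (fun q hq he => hfe q (by simp [hq]) he) s (PySem.Set.add t (f p))
        (by rw [hpv, discard_add_self, hst])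
    · rw [if_neg hp]
      exact ih (fun q hq he => hfe q (by simp [hq]) he) _ _
        (discard_add_congr s t (f p) v hst)

-- folding add over a list that only re-adds present elements is a no-op
theorem foldl_add_sub (t : List Int) : ∀ (s : List Int), (∀ x ∈ t, x ∈ s) →
    t.foldl PySem.Set.add s = s := by
  induction t with
  | nil => intro s _; rfl
  | cons a t ih =>
    intro s h
    have ha : a ∈ s := h a (by simp)
    have : PySem.Set.add s a = s := by
      simp [PySem.Set.add, ha]
    simp only [List.foldl, this]
    exact ih s (fun x hx => h x (by simp [hx]))

theorem foldl_add_prefix (l : List Int) : ∀ (t : List Int), ∃ u, l.foldl PySem.Set.add t = t ++ u := by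
  induction l with
  | nil => intro t; exact ⟨[], by simp⟩
  | cons a l ih =>
    intro t
    simp only [List.foldl]
    by_cases h : a ∈ t
    · rw [show PySem.Set.add t a = t from by simp [PySem.Set.add, h]]
      exact ih t
    · rw [show PySem.Set.add t a = t ++ [a] from by simp [PySem.Set.add, h]]
      obtain ⟨u, hu⟩ := ih (t ++ [a])
      exact ⟨[a] ++ u, by rw [hu, List.append_assoc]⟩

theorem mem_add_self (s : List Int) (a : Int) : a ∈ PySem.Set.add s a := by
  by_cases h : a ∈ s <;> simp [PySem.Set.add, h]

theorem add_mem_eq (s : List Int) (a : Int) (h : a ∈ s) : PySem.Set.add s a = s := by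
  simp [PySem.Set.add, h]

-- folding add over an already-deduplicated fold result is folding over the raw list
theorem foldl_add_foldl (l : List Int) : ∀ (t s : List Int), (∀ x ∈ t, x ∈ s) →
    List.foldl PySem.Set.add s (List.foldl PySem.Set.add t l) = List.foldl PySem.Set.add s l := by
  induction l with
  | nil => intro t s h; exact foldl_add_sub t s h
  | cons a l ih =>
    intro t s h
    simp only [List.foldl]
    by_cases ha : a ∈ t
    · rw [add_mem_eq t a ha, add_mem_eq s a (h a ha)]
      exact ih t s h
    · have hta : PySem.Set.add t a = t ++ [a] := by
        simp [PySem.Set.add, ha]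
      have hsub : ∀ x ∈ t ++ [a], x ∈ PySem.Set.add s a := by
        intro x hx
        rcases List.mem_append.mp hx with hx | hx
        · by_cases hs : a ∈ s <;> simp [PySem.Set.add, hs, h x hx]
        · simp only [List.mem_singleton] at hx
          exact hx ▸ mem_add_self s a
      obtain ⟨u, hu⟩ := foldl_add_prefix l (t ++ [a])
      have key : List.foldl PySem.Set.add s (List.foldl PySem.Set.add (t ++ [a]) l)
          = List.foldl PySem.Set.add (PySem.Set.add s a) (List.foldl PySem.Set.add (t ++ [a]) l) := by
        rw [hu, List.foldl_append, List.foldl_append, List.foldl_append, List.foldl_append]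
        have h1 : List.foldl PySem.Set.add s t = s := foldl_add_sub t s h
        have h2 : List.foldl PySem.Set.add (PySem.Set.add s a) t = PySem.Set.add s a :=
          foldl_add_sub t _ (fun x hx => hsub x (List.mem_append.mpr (Or.inl hx)))
        rw [h1, h2]
        simp only [List.foldl]
        rw [add_mem_eq (PySem.Set.add s a) a (mem_add_self s a)]
      rw [hta, key]
      exact ih (t ++ [a]) (PySem.Set.add s a) hsub

-- s | set(l) is just folding the raw elements of l into s
theorem union_ofList (s : List Int) (l : List Int) :
    PySem.Set.union s (PySem.Set.ofList l) = List.foldl PySem.Set.add s l := by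
  show List.foldl PySem.Set.add s (List.foldl PySem.Set.add PySem.Set.empty l)
      = List.foldl PySem.Set.add s l
  exact foldl_add_foldl l PySem.Set.empty s (by intro x hx; cases hx)

theorem foldl_ofList_append (s t : List Int) :
    List.foldl PySem.Set.add (PySem.Set.ofList s) t = PySem.Set.ofList (s ++ t) := by
  simp [PySem.Set.ofList]

-- unfolding the three recursive calls of from_row
theorem fromRow_zero (matrix : List (List Int)) :
    fromRow matrix 0
      = PySem.Set.ofList
          (PySem.List.slice (PySem.List.pyGetD matrix (0 : Int) []) none (some 3)
            ++ (PySem.List.slice (PySem.List.pyGetD matrix (1 : Int) []) none (some 3)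
            ++ PySem.List.slice (PySem.List.pyGetD matrix (2 : Int) []) none (some 3))) := by
  rw [fromRow, fromRow, fromRow, fromRow]
  norm_num
  rw [show (PySem.Set.ofList (PySem.List.slice (PySem.List.pyGetD matrix (2 : Int) []) none (some 3))).union
        ([] : List Int)
      = PySem.Set.ofList (PySem.List.slice (PySem.List.pyGetD matrix (2 : Int) []) none (some 3)) from rfl]
  rw [union_ofList, foldl_ofList_append, union_ofList, foldl_ofList_append]

-- under Pre_, a row's slice [:3] lists its first three indexed cells
theorem slice3_eq (row : List Int) (h : 3 ≤ row.length) :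
    PySem.List.slice row none (some 3)
      = [PySem.List.pyGetD row 0 0, PySem.List.pyGetD row 1 0, PySem.List.pyGetD row 2 0] := by
  match row, h with
  | a :: b :: c :: rest, _ =>
    have hs := PySem.List.slice_to (xs := a :: b :: c :: rest) (b := 3) (by norm_num)
    rw [hs]
    norm_num
    simp [pysem, List.take]

-- ===== VERDICT (by name: the statement is the Claim_ definition above) =====
theorem used_numbers_py_spec : Claim_equal_used_numbers_py := by
  intro matrix exclude _hdom hpre
  obtain ⟨hlen, hrows, _hex⟩ := hpre
  unfold Spec_used_numbers_py used_numbers_py used_numbers_py_alt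
  have hr : PySem.List.pyRange 0 3 1 = [0, 1, 2] := by decide
  have hrow : ∀ i : Nat, i < 3 →
      PySem.List.slice (PySem.List.pyGetD matrix (i : Int) []) none (some 3)
        = [PySem.List.pyGetD (PySem.List.pyGetD matrix (i : Int) []) 0 0,
           PySem.List.pyGetD (PySem.List.pyGetD matrix (i : Int) []) 1 0,
           PySem.List.pyGetD (PySem.List.pyGetD matrix (i : Int) []) 2 0] := by
    intro i hi
    apply slice3_eq
    apply hrows
    rw [PySem.List.pyGetD_natCast, List.getD_eq_getElem _ _ (by omega)]
    exact List.mem_take_iff_getElem.mpr ⟨i, by omega, rfl⟩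
  have hB0 := fromRow_zero matrix
  have h0 := hrow 0 (by norm_num); have h1 := hrow 1 (by norm_num); have h2 := hrow 2 (by norm_num)
  norm_num at h0 h1 h2
  rw [h0, h1, h2] at hB0
  cases exclude with
  | none =>
    rw [hr, hB0]
    simp [PySem.Set.ofList]
  | some rc =>
    obtain ⟨r, c⟩ := rc
    rw [hr, hB0]
    simp only [guarded_remove_eq_discard, PySem.Set.ofList]
    have hA := List.foldl_flatMap
      (f := fun i : Int => ([0, 1, 2] : List Int).map (fun j => (i, j)))
      (g := fun s (p : Int × Int) => if some (r, c) = some p then s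
            else PySem.Set.add s (PySem.List.pyGetD (PySem.List.pyGetD matrix p.1 []) p.2 0))
      (l := [0, 1, 2]) (init := (PySem.Set.empty : List Int))
    have hB := List.foldl_flatMap
      (f := fun i : Int => ([0, 1, 2] : List Int).map (fun j => (i, j)))
      (g := fun s (p : Int × Int) =>
            PySem.Set.add s (PySem.List.pyGetD (PySem.List.pyGetD matrix p.1 []) p.2 0))
      (l := [0, 1, 2]) (init := (PySem.Set.empty : List Int))
    simp only [List.foldl_map] at hA hB
    rw [← hA]
    have hB2 : (([PySem.List.pyGetD (PySem.List.pyGetD matrix (0 : Int) []) 0 0,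
           PySem.List.pyGetD (PySem.List.pyGetD matrix (0 : Int) []) 1 0,
           PySem.List.pyGetD (PySem.List.pyGetD matrix (0 : Int) []) 2 0]
        ++ ([PySem.List.pyGetD (PySem.List.pyGetD matrix (1 : Int) []) 0 0,
           PySem.List.pyGetD (PySem.List.pyGetD matrix (1 : Int) []) 1 0,
           PySem.List.pyGetD (PySem.List.pyGetD matrix (1 : Int) []) 2 0]
        ++ [PySem.List.pyGetD (PySem.List.pyGetD matrix (2 : Int) []) 0 0,
           PySem.List.pyGetD (PySem.List.pyGetD matrix (2 : Int) []) 1 0,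
           PySem.List.pyGetD (PySem.List.pyGetD matrix (2 : Int) []) 2 0])) : List Int).foldl
        PySem.Set.add PySem.Set.empty
        = (([0, 1, 2] : List Int).flatMap (fun i =>
            ([0, 1, 2] : List Int).map (fun j => ((i, j) : Int × Int)))).foldl
          (fun s p => PySem.Set.add s (PySem.List.pyGetD (PySem.List.pyGetD matrix p.1 []) p.2 0))
          PySem.Set.empty := by
      rw [hB]
      simp
    rw [hB2]
    exact discard_fold_skip _ _ (r, c) _ (fun p _ he => by rw [he]) _ _ rfl
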